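-- pv_equiv track=rewrite | github.com/w-mj/Pysh | pysh/codec/token.py | _search_indents
-- ===== SOURCE A (Python) =====
-- def _search_indents(line):
--     indents = 0
--     spaces = 0
--     for c in line:
--         if c == '\t':
--             indents += 1
--         elif c == ' ':
--             if spaces == 3:
--                 indents += 1
--                 spaces = 0
--             else:
--                 spaces += 1
--         else:
--             assert False
--     return indents
-- ===== SOURCE B (Python) =====
-- def _search_indents(line):
--     assert all(c in '\t ' for c in line)
--     return line.count('\t') + line.count(' ') // 4
-- ===== Notes on version B (the rewrite author's own statement) =====
-- stated objective: simpler
-- what changed: Replaces the per-character group-of-four state machine with aggregate counts: validate characters once, then tabs + spaces // 4 (the original's space counter never resets across tabs, so floor division of the total space count is exact).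
import Mathlib
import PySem

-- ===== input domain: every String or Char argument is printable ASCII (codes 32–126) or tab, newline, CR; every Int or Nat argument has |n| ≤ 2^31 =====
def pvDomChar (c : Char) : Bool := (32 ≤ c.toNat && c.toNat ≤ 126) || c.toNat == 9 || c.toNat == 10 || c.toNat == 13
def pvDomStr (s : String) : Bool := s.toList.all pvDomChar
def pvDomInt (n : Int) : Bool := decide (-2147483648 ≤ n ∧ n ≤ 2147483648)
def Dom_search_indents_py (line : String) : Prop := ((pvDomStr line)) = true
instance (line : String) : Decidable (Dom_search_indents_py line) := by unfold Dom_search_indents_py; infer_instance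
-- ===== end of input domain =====

-- B replaces A's per-character group-of-four state machine with aggregate counts (tabs + spaces // 4); simpler decomposition, same cost.


-- ===== PORT A =====
-- the 'assert False' branch raises in Python; such inputs are excluded by Pre_, the port leaves the state unchanged there
def searchIndentsStep (st : Int × Int) (c : Char) : Int × Int :=
  if c = '\t' then (st.1 + 1, st.2)
  else if c = ' ' then
    if st.2 = 3 then (st.1 + 1, 0) else (st.1, st.2 + 1)
  else st

def search_indents_py (line : String) : Int :=
  (line.toList.foldl searchIndentsStep (0, 0)).1

-- ===== PORT B =====
-- Source B: assert all chars tab/space (raises otherwise — excluded by Pre_), then count('\t') + count(' ') // 4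
def search_indents_py_alt (line : String) : Int :=
  (line.toList.count '\t' : Int) + ((line.toList.count ' ' / 4 : Nat) : Int)

-- ===== PRECONDITION & SPEC =====
-- Pre_ excludes exactly the lines containing a character other than tab or space: A's 'assert False' (and B's assert) raises there.
def Pre_search_indents_py (line : String) : Prop :=
  line.toList.all (fun c => c == '\t' || c == ' ') = true
instance (line : String) : Decidable (Pre_search_indents_py line) := by unfold Pre_search_indents_py; infer_instance
def pvWitness_search_indents_py : String := "\t   \t  "

def Spec_search_indents_py (line : String) (out : Int) : Prop := out = search_indents_py_alt line
instance (line : String) (out : Int) : Decidable (Spec_search_indents_py line out) := by unfold Spec_search_indents_py; infer_instance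

-- ===== CLAIM (what is proved, stated in full; the proofs are below) =====
def Claim_equal_search_indents_py : Prop := ∀ (line : String), Dom_search_indents_py line → Pre_search_indents_py line → Spec_search_indents_py line (search_indents_py line)

-- ===== LEMMAS AND PROOFS =====

-- loop invariant: starting from (i, s) with s < 4, the fold's indent count is
-- i + (#tabs) + (s + #spaces)/4 and its space counter is (s + #spaces) % 4
theorem searchIndents_fold_inv (l : List Char)
    (hl : l.all (fun c => c == '\t' || c == ' ') = true) :
    ∀ (i s : Int), 0 ≤ s → s < 4 →
      l.foldl searchIndentsStep (i, s)
        = (i + (l.count '\t' : Int) + ((s.toNat + l.count ' ') / 4 : Nat),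
           (((s.toNat + l.count ' ') % 4 : Nat) : Int)) := by
  induction l with
  | nil =>
    intro i s h0 h4
    simp [List.foldl]
    omega
  | cons c t ih =>
    intro i s h0 h4
    simp only [List.all_cons, Bool.and_eq_true, Bool.or_eq_true, beq_iff_eq] at hl
    obtain ⟨hc, ht⟩ := hl
    rcases hc with hc | hc
    · subst hc
      have hstep : searchIndentsStep (i, s) '\t' = (i + 1, s) := by
        simp [searchIndentsStep]
      rw [List.foldl_cons, hstep, ih ht (i + 1) s h0 h4]
      simp
      omega
    · subst hc
      have hne : (' ' : Char) ≠ '\t' := by decide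
      have hcnt : (' ' :: t).count ' ' = t.count ' ' + 1 := by
        simp
      have hcntT : (' ' :: t).count '\t' = t.count '\t' := by
        simp [hne]
      by_cases hs : s = 3
      · subst hs
        have hstep : searchIndentsStep (i, 3) ' ' = (i + 1, 0) := by
          simp [searchIndentsStep, hne]
        rw [List.foldl_cons, hstep, ih ht (i + 1) 0 (by omega) (by omega)]
        rw [Prod.mk.injEq]
        constructor
        · rw [hcntT, hcnt]
          have h3 : (3 : Int).toNat = 3 := by decide
          have h4' : (3 + (t.count ' ' + 1)) / 4 = t.count ' ' / 4 + 1 := by omega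
          have h0' : (0 + t.count ' ') / 4 = t.count ' ' / 4 := by omega
          rw [h3]
          show i + 1 + (t.count '\t' : Int) + ((0 + t.count ' ') / 4 : Nat)
              = i + (t.count '\t' : Int) + ((3 + (t.count ' ' + 1)) / 4 : Nat)
          rw [h4', h0']
          push_cast
          ring
        · rw [hcnt]
          have h3 : (3 : Int).toNat = 3 := by decide
          rw [h3]
          congr 1
          omega
      · have hstep : searchIndentsStep (i, s) ' ' = (i, s + 1) := by
          simp [searchIndentsStep, hne, hs]
        rw [List.foldl_cons, hstep, ih ht i (s + 1) (by omega) (by omega)]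
        have hst : (s + 1).toNat = s.toNat + 1 := by omega
        rw [Prod.mk.injEq, hcnt, hcntT, hst]
        constructor
        · congr 2
          omega
        · congr 1
          omega

-- ===== VERDICT (by name: the statement is the Claim_ definition above) =====
theorem search_indents_py_spec : Claim_equal_search_indents_py := by
  intro line _ hpre
  unfold Spec_search_indents_py search_indents_py search_indents_py_alt
  rw [searchIndents_fold_inv line.toList hpre 0 0 le_rfl (by norm_num)]
  simp
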